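-- pv_equiv track=rewrite | github.com/zz9tf/mal-rag-hotpot | utils/wikipedia_database_preprocessor.py | _remove_braces_content
-- ===== SOURCE A (Python) =====
-- def _remove_braces_content(text):
--     """Remove {{...}} templates, preserving some useful content."""
--     stack = []
--     result = []
--     i = 0
--
--     while i < len(text):
--         char = text[i]
--         if char == '{' and i + 1 < len(text) and text[i + 1] == '{':
--             stack.append(len(result))
--             i += 2
--         elif char == '}' and i + 1 < len(text) and text[i + 1] == '}' and stack:
--             start = stack.pop()
--             block_content = ''.join(result[start:])
--             if '|' in block_content and block_content.startswith('Blockquote'):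
--                 # Keep content after the pipe for blockquotes
--                 parts = block_content.split('|', 1)
--                 if len(parts) > 1:
--                     result = result[:start] + list(parts[1])
--             else:
--                 result = result[:start]  # Remove the entire template
--             i += 2
--         else:
--             result.append(char)
--             i += 1
--
--     return ''.join(result)
-- ===== SOURCE B (Python) =====
-- def _remove_braces_content(text):
--     """Remove {{...}} templates, preserving some useful content.
--
--     Recursive-descent parser: a template body is parsed by a recursive call
--     that returns (content, next_index, closed); the caller decides whether to
--     drop it, keep its post-pipe tail (Blockquote) or, when the '{{' is never
--     closed, splice the raw content back in. No explicit stack, no re-slicing.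
--     """
--     n = len(text)
--
--     def parse(i, top):
--         # parse from i to a matching '}}' (closed) or to the end of text
--         out = []
--         while i < n:
--             c = text[i]
--             if c == '{' and i + 1 < n and text[i + 1] == '{':
--                 inner, i, closed = parse(i + 2, False)
--                 if closed:
--                     if inner.startswith('Blockquote') and '|' in inner:
--                         out.append(inner[inner.index('|') + 1:])
--                 else:
--                     out.append(inner)
--             elif c == '}' and i + 1 < n and text[i + 1] == '}' and not top:
--                 return ''.join(out), i + 2, True
--             else:
--                 out.append(c)
--                 i += 1
--         return ''.join(out), i, False
--
--     return parse(0, True)[0]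
-- ===== Notes on version B (the rewrite author's own statement) =====
-- stated objective: alternative
-- what changed: Replaced A's explicit index stack over one flat result list (re-joining and re-slicing the output suffix at every '}}') by a recursive-descent parser: each '{{' starts a recursive call that returns (content, next index, closed-flag) at its matching '}}', and the caller drops, keeps the post-pipe tail, or splices unclosed content back in.
import Mathlib
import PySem

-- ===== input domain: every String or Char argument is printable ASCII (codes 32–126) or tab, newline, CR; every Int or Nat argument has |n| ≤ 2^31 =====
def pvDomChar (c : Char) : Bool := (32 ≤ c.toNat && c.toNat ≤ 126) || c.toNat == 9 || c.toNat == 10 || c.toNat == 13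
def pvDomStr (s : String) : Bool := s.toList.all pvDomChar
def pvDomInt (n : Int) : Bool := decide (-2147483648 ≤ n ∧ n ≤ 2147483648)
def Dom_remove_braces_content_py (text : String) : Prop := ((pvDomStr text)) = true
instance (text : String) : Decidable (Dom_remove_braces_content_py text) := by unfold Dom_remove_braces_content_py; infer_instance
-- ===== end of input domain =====

-- B replaces A's explicit index stack over one flat result list (with its suffix re-join/re-slice
-- at every '}}') by a recursive-descent parser: a template body is parsed by a recursive call
-- returning (content, next index, closed-flag) at its matching '}}'.

-- ===== PORT A =====
-- 'Blockquote', shared literal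
def rbcBQ : List Char := "Blockquote".toList

-- A's while loop: stack of indices into `result` (top at head = Python's list end), one flat char
-- list. char = text[i] (in bounds), written t.getD i ' '; block = ''.join(result[start:]) =
-- result.drop start. The fuel argument only drives the structural recursion: each iteration spends
-- one unit and strictly increases i, so fuel = t.length (the top-level call) never runs out early.
def rbcA_loop (t : List Char) : Nat → List Nat → List Char → Nat → List Char
  | 0, _, result, _ => result
  | fuel + 1, stack, result, i =>
    if i < t.length then
      if t.getD i ' ' = '{' ∧ i + 1 < t.length ∧ t.getD (i + 1) ' ' = '{' then
        rbcA_loop t fuel (result.length :: stack) result (i + 2)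
      else if t.getD i ' ' = '}' ∧ i + 1 < t.length ∧ t.getD (i + 1) ' ' = '}' then
        -- Python's 'and stack' in the elif: an empty stack falls through to the else branch
        match stack with
        | start :: rest =>
          if PySem.Chars.isIn ['|'] (result.drop start) = true ∧
              PySem.Chars.startswith (result.drop start) rbcBQ = true then
            -- parts = block.split('|', 1); if len(parts) > 1: result = result[:start] + list(parts[1])
            if 1 < (PySem.Chars.splitOnMax (result.drop start) ['|'] 1).length then
              rbcA_loop t fuel rest
                (result.take start ++ (PySem.Chars.splitOnMax (result.drop start) ['|'] 1).getD 1 [])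
                (i + 2)
            else
              rbcA_loop t fuel rest result (i + 2)
          else
            rbcA_loop t fuel rest (result.take start) (i + 2)
        | [] => rbcA_loop t fuel [] (result ++ [t.getD i ' ']) (i + 1)
      else
        rbcA_loop t fuel stack (result ++ [t.getD i ' ']) (i + 1)
    else result

def remove_braces_content_py (text : String) : String :=
  String.ofList (rbcA_loop text.toList text.toList.length [] [] 0)

-- ===== PORT B =====
-- what the caller of B's recursive parse appends for a sub-parse result: closed Blockquote
-- templates keep the post-pipe tail (inner[inner.index('|') + 1:]: under the '|'-in-inner guard
-- index = find ≥ 0, and a slice from a nonnegative start is List.drop — exact), other closed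
-- templates vanish, unclosed ones keep their raw content
def rbcPiece (closed : Bool) (inner : List Char) : List Char :=
  if closed then
    if PySem.Chars.startswith inner rbcBQ = true ∧ PySem.Chars.isIn ['|'] inner = true then
      inner.drop ((PySem.Chars.find inner ['|']).toNat + 1)
    else []
  else inner

-- B's parse(i, top): its while loop is the structural recursion (the literal/continuation steps
-- are the loop's iterations, cons-ing onto `out`); '{{' makes the recursive sub-parse call,
-- '}}' (with not top) returns closed. Fuel only drives the recursion: every call either returns
-- or recurses with one unit less, and ≤ one call is spent per input position, so t.length + 1
-- at the top never runs out early.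
def rbcParse (t : List Char) : Nat → Nat → Bool → List Char × Nat × Bool
  | 0, i, _ => ([], i, false)
  | fuel + 1, i, top =>
    if i < t.length then
      if t.getD i ' ' = '{' ∧ i + 1 < t.length ∧ t.getD (i + 1) ' ' = '{' then
        let r := rbcParse t fuel (i + 2) false
        let s := rbcParse t fuel r.2.1 top
        (rbcPiece r.2.2 r.1 ++ s.1, s.2)
      else if t.getD i ' ' = '}' ∧ i + 1 < t.length ∧ t.getD (i + 1) ' ' = '}' ∧ top = false then
        ([], i + 2, true)
      else
        let s := rbcParse t fuel (i + 1) top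
        (t.getD i ' ' :: s.1, s.2)
    else ([], i, false)

def remove_braces_content_py_alt (text : String) : String :=
  String.ofList (rbcParse text.toList (text.toList.length + 1) 0 true).1

-- ===== PRECONDITION & SPEC =====
def Spec_remove_braces_content_py (text : String) (out : String) : Prop := out = remove_braces_content_py_alt text
instance (text : String) (out : String) : Decidable (Spec_remove_braces_content_py text out) := by unfold Spec_remove_braces_content_py; infer_instance

-- ===== CLAIM (what is proved, stated in full; the proofs are below) =====
def Claim_equal_remove_braces_content_py : Prop := ∀ (text : String), Dom_remove_braces_content_py text → Spec_remove_braces_content_py text (remove_braces_content_py text)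

-- ===== LEMMAS AND PROOFS =====

-- proof-only intermediate: the same scan with a stack of per-frame buffers (top at head); it is
-- related to A's loop by the abstraction rbcAbs and to B's parser by rbcM below
def rbcB_loop (t : List Char) : Nat → List (List Char) → List Char → Nat → List Char
  | 0, stack, buf, _ => stack.reverse.flatten ++ buf
  | fuel + 1, stack, buf, i =>
    if i < t.length then
      if t.getD i ' ' = '{' ∧ i + 1 < t.length ∧ t.getD (i + 1) ' ' = '{' then
        rbcB_loop t fuel (buf :: stack) [] (i + 2)
      else if t.getD i ' ' = '}' ∧ i + 1 < t.length ∧ t.getD (i + 1) ' ' = '}' then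
        match stack with
        | parent :: rest =>
          if PySem.Chars.isIn ['|'] buf = true ∧ PySem.Chars.startswith buf rbcBQ = true then
            rbcB_loop t fuel rest (parent ++ (PySem.Chars.splitOnMax buf ['|'] 1).getD 1 []) (i + 2)
          else
            rbcB_loop t fuel rest parent (i + 2)
        | [] => rbcB_loop t fuel stack (buf ++ [t.getD i ' ']) (i + 1)
      else
        rbcB_loop t fuel stack (buf ++ [t.getD i ' ']) (i + 1)
    else stack.reverse.flatten ++ buf

-- abstraction: A's index stack recovered from the frame stack (top at head)

-- abstraction: A's index stack recovered from the frame stack (top at head)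
def rbcAbs : List (List Char) → List Nat
  | [] => []
  | f :: r => (r.reverse.flatten.length + f.length) :: rbcAbs r

-- decompose at the FIRST pipe

-- decompose at the FIRST pipe
lemma rbc_pipe_decomp (c : List Char) (h : PySem.Chars.isIn ['|'] c = true) :
    ∃ p rest, c = p ++ '|' :: rest ∧ '|' ∉ p := by
  have hm : '|' ∈ c := by
    have := (PySem.Chars.isIn_iff_infix _ _).mp h
    exact List.singleton_sublist.mp this.sublist
  refine ⟨c.takeWhile (· ≠ '|'), (c.dropWhile (· ≠ '|')).tail, ?_, ?_⟩
  · have hne : c.dropWhile (· ≠ '|') ≠ [] := by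
      simp only [ne_eq, List.dropWhile_eq_nil_iff, not_forall]
      exact ⟨'|', hm, by simp⟩
    have hhead : (c.dropWhile (· ≠ '|')).head hne = '|' := by
      have := List.head_dropWhile_not (p := (· ≠ '|')) (l := c) hne
      simpa using this
    have hd : c.dropWhile (· ≠ '|') = '|' :: (c.dropWhile (· ≠ '|')).tail := by
      conv_lhs => rw [← List.cons_head_tail hne]
      rw [hhead]
    conv_lhs => rw [← List.takeWhile_append_dropWhile (p := (· ≠ '|')) (l := c), hd]
  · intro hmem
    have := List.mem_takeWhile_imp hmem
    simp at this

lemma rbc_go_zero (fuel : Nat) (l cur : List Char) (acc : List (List Char)) :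
    PySem.Chars.splitOnMax.go ['|'] fuel 0 l cur acc = ((cur.reverse ++ l) :: acc).reverse := by
  cases fuel <;> cases l <;> simp [PySem.Chars.splitOnMax.go]

lemma rbc_split_go (p : List Char) (hp : '|' ∉ p) : ∀ (fuel : Nat) (rest cur : List Char)
    (acc : List (List Char)), p.length < fuel →
    PySem.Chars.splitOnMax.go ['|'] fuel 1 (p ++ '|' :: rest) cur acc =
      acc.reverse ++ [cur.reverse ++ p, rest] := by
  induction p with
  | nil =>
    intro fuel rest cur acc hf
    cases fuel with
    | zero => omega
    | succ f =>
      simp only [List.nil_append, PySem.Chars.splitOnMax.go]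
      rw [if_neg (by omega), if_pos (by simp [List.isPrefixOf])]
      simp [rbc_go_zero]
  | cons c p ih =>
    intro fuel rest cur acc hf
    have hc : c ≠ '|' := fun h => hp (h ▸ List.mem_cons_self ..)
    cases fuel with
    | zero => omega
    | succ f =>
      simp only [List.cons_append, PySem.Chars.splitOnMax.go]
      rw [if_neg (by omega), if_neg (by simp [List.isPrefixOf]; intro h; exact (hc h.symm).elim)]
      have := ih (fun h => hp (List.mem_cons_of_mem _ h)) f rest (c :: cur) acc
        (by simpa using Nat.lt_of_succ_lt_succ hf)
      rw [this]; simp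

-- block.split('|', 1) at the first pipe
lemma rbc_split_pair (p rest : List Char) (hp : '|' ∉ p) :
    PySem.Chars.splitOnMax (p ++ '|' :: rest) ['|'] 1 = [p, rest] := by
  unfold PySem.Chars.splitOnMax
  rw [if_neg (by norm_num)]
  have := rbc_split_go p hp ((p ++ '|' :: rest).length + 1) rest [] []
    (by simp)
  simpa using this

lemma rbc_find_pipe (p rest : List Char) (hp : '|' ∉ p) :
    PySem.Chars.find (p ++ '|' :: rest) ['|'] = (p.length : Int) := by
  have hinf : ['|'] <:+: (p ++ '|' :: rest) := ⟨p, rest, by simp⟩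
  have hnn : 0 ≤ PySem.Chars.find (p ++ '|' :: rest) ['|'] :=
    (PySem.Chars.find_nonneg_iff _ _).mpr hinf
  obtain ⟨hpre, hmin⟩ := PySem.Chars.find_spec (s := p ++ '|' :: rest) (sub := ['|']) hnn
  set k := (PySem.Chars.find (p ++ '|' :: rest) ['|']).toNat with hk
  have hkp : k = p.length := by
    rcases Nat.lt_trichotomy k p.length with h | h | h
    · -- drop k has head p[k] ≠ '|'
      exfalso
      obtain ⟨tl, htl⟩ := hpre
      have hget : (p ++ '|' :: rest).drop k = '|' :: tl := by simpa using htl.symm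
      have : p[k]? = some '|' := by
        have h1 : ((p ++ '|' :: rest).drop k)[0]? = some '|' := by rw [hget]; rfl
        rw [List.getElem?_drop] at h1
        rw [← List.getElem?_append_left (l₂ := '|' :: rest) (by omega)]
        simpa using h1
      exact hp (List.mem_of_getElem? this)
    · exact h
    · exfalso
      exact hmin p.length h ⟨rest, by simp⟩
  omega

-- the two Blockquote filters (A/loop: split-and-take-part-1; B: drop past the first pipe) agree
lemma rbc_piece_eq (c : List Char) :
    (if PySem.Chars.isIn ['|'] c = true ∧ PySem.Chars.startswith c rbcBQ = true then
      (PySem.Chars.splitOnMax c ['|'] 1).getD 1 [] else []) = rbcPiece true c := by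
  unfold rbcPiece
  by_cases h : PySem.Chars.isIn ['|'] c = true ∧ PySem.Chars.startswith c rbcBQ = true
  · rw [if_pos h, if_pos rfl, if_pos ⟨h.2, h.1⟩]
    obtain ⟨p, rest, rfl, hp⟩ := rbc_pipe_decomp c h.1
    rw [rbc_split_pair p rest hp, rbc_find_pipe p rest hp]
    have : (p ++ '|' :: rest) = (p ++ ['|']) ++ rest := by simp
    rw [this, List.drop_left' (by simp)]
    rfl
  · rw [if_neg h, if_pos rfl, if_neg (fun hh => h ⟨hh.2, hh.1⟩)]

lemma rbc_parts_len (b : List Char) (h : PySem.Chars.isIn ['|'] b = true) :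
    1 < (PySem.Chars.splitOnMax b ['|'] 1).length := by
  obtain ⟨p, rest, rfl, hp⟩ := rbc_pipe_decomp b h
  rw [rbc_split_pair p rest hp]; simp

-- the A-loop/frame-loop correspondence: A run on the abstraction of the frame state
lemma rbc_key (t : List Char) : ∀ (fuel i : Nat) (sb : List (List Char)) (buf : List Char),
    rbcA_loop t fuel (rbcAbs sb) (sb.reverse.flatten ++ buf) i = rbcB_loop t fuel sb buf i := by
  intro fuel
  induction fuel with
  | zero => intro i sb buf; rfl
  | succ k ih =>
    intro i sb buf
    simp only [rbcA_loop, rbcB_loop]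
    by_cases hlt : i < t.length
    · rw [if_pos hlt, if_pos hlt]
      by_cases hopen : t.getD i ' ' = '{' ∧ i + 1 < t.length ∧ t.getD (i + 1) ' ' = '{'
      · rw [if_pos hopen, if_pos hopen]
        have h1 : (sb.reverse.flatten ++ buf).length :: rbcAbs sb = rbcAbs (buf :: sb) := by
          simp [rbcAbs, Nat.add_comm]
        have h2 : sb.reverse.flatten ++ buf = (buf :: sb).reverse.flatten ++ [] := by simp
        rw [h1, h2]
        exact ih (i + 2) (buf :: sb) []
      · rw [if_neg hopen, if_neg hopen]
        by_cases hclose : t.getD i ' ' = '}' ∧ i + 1 < t.length ∧ t.getD (i + 1) ' ' = '}'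
        · rw [if_pos hclose, if_pos hclose]
          cases sb with
          | nil =>
            simp only [rbcAbs, List.reverse_nil, List.flatten_nil, List.nil_append]
            have h := ih (i + 1) [] (buf ++ [t.getD i ' '])
            simpa [rbcAbs] using h
          | cons f r =>
            simp only [rbcAbs]
            have hL : (f :: r).reverse.flatten ++ buf = (r.reverse.flatten ++ f) ++ buf := by simp
            have hlen : r.reverse.flatten.length + f.length = (r.reverse.flatten ++ f).length := by
              simp
            rw [hL, hlen, List.drop_left, List.take_left]
            by_cases hbq : PySem.Chars.isIn ['|'] buf = true ∧
                PySem.Chars.startswith buf rbcBQ = true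
            · rw [if_pos hbq, if_pos hbq, if_pos (rbc_parts_len buf hbq.1)]
              have h := ih (i + 2) r (f ++ (PySem.Chars.splitOnMax buf ['|'] 1).getD 1 [])
              simpa [List.append_assoc] using h
            · rw [if_neg hbq, if_neg hbq]
              exact ih (i + 2) r f
        · rw [if_neg hclose, if_neg hclose]
          have h := ih (i + 1) sb (buf ++ [t.getD i ' '])
          simpa [List.append_assoc] using h
    · rw [if_neg hlt, if_neg hlt]

-- the frame loop is fuel-stable once fuel covers the remaining input

lemma rbc_loop_ge (t : List Char) (fl : Nat) (sb : List (List Char)) (buf : List Char) (i : Nat)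
    (h : t.length ≤ i) : rbcB_loop t fl sb buf i = sb.reverse.flatten ++ buf := by
  cases fl <;> simp [rbcB_loop, Nat.not_lt.mpr h]

-- the frame loop is fuel-stable once fuel covers the remaining input
lemma rbc_loop_stab (t : List Char) : ∀ (fl fg i : Nat) (sb : List (List Char)) (buf : List Char),
    t.length ≤ fl + i → t.length ≤ fg + i →
    rbcB_loop t fl sb buf i = rbcB_loop t fg sb buf i := by
  intro fl
  induction fl with
  | zero =>
    intro fg i sb buf hl hg
    rw [rbc_loop_ge t _ _ _ _ (by omega), rbc_loop_ge t _ _ _ _ (by omega)]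
  | succ f ih =>
    intro fg i sb buf hl hg
    by_cases hi : i < t.length
    · obtain ⟨g, rfl⟩ : ∃ g, fg = g + 1 := ⟨fg - 1, by omega⟩
      simp only [rbcB_loop, if_pos hi]
      by_cases h1 : t.getD i ' ' = '{' ∧ i + 1 < t.length ∧ t.getD (i + 1) ' ' = '{'
      · rw [if_pos h1, if_pos h1]
        exact ih g (i + 2) (buf :: sb) [] (by omega) (by omega)
      · rw [if_neg h1, if_neg h1]
        by_cases h2 : t.getD i ' ' = '}' ∧ i + 1 < t.length ∧ t.getD (i + 1) ' ' = '}'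
        · rw [if_pos h2, if_pos h2]
          cases sb with
          | nil => exact ih g (i + 1) [] (buf ++ [t.getD i ' ']) (by omega) (by omega)
          | cons parent rest =>
            simp only []
            by_cases h3 : PySem.Chars.isIn ['|'] buf = true ∧
                PySem.Chars.startswith buf rbcBQ = true
            · rw [if_pos h3, if_pos h3]
              exact ih g (i + 2) rest _ (by omega) (by omega)
            · rw [if_neg h3, if_neg h3]
              exact ih g (i + 2) rest parent (by omega) (by omega)
        · rw [if_neg h2, if_neg h2]
          exact ih g (i + 1) sb (buf ++ [t.getD i ' ']) (by omega) (by omega)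
    · rw [rbc_loop_ge t _ _ _ _ (by omega), rbc_loop_ge t _ _ _ _ (by omega)]

-- the parser's returned index never moves left
lemma rbc_parse_mono (t : List Char) : ∀ (fuel i : Nat) (top : Bool),
    i ≤ (rbcParse t fuel i top).2.1 := by
  intro fuel
  induction fuel with
  | zero => intro i top; simp [rbcParse]
  | succ f ih =>
    intro i top
    simp only [rbcParse]
    split_ifs with h1 h2 h3
    · have ha := ih (i + 2) false
      have hb := ih (rbcParse t f (i + 2) false).2.1 top
      simp only []
      omega
    · simp
    · simp only []
      have := ih (i + 1) top
      omega
    · simp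

lemma rbc_parse_ge (t : List Char) (fuel i : Nat) (top : Bool) (h : t.length ≤ i) :
    rbcParse t fuel i top = ([], i, false) := by
  cases fuel <;> simp [rbcParse, Nat.not_lt.mpr h]

lemma rbc_parse_unclosed (t : List Char) : ∀ (fuel i : Nat) (top : Bool),
    t.length + 1 ≤ fuel + i → (rbcParse t fuel i top).2.2 = false →
    t.length ≤ (rbcParse t fuel i top).2.1 := by
  intro fuel
  induction fuel with
  | zero => intro i top h _; simp [rbcParse]; omega
  | succ f ih =>
    intro i top h hcl
    by_cases hi : i < t.length
    · simp only [rbcParse, if_pos hi] at hcl ⊢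
      by_cases h1 : t.getD i ' ' = '{' ∧ i + 1 < t.length ∧ t.getD (i + 1) ' ' = '{'
      · rw [if_pos h1] at hcl ⊢
        simp only [] at hcl ⊢
        have hm := rbc_parse_mono t f (i + 2) false
        exact ih (rbcParse t f (i + 2) false).2.1 top (by omega) hcl
      · rw [if_neg h1] at hcl ⊢
        by_cases h2 : t.getD i ' ' = '}' ∧ i + 1 < t.length ∧ t.getD (i + 1) ' ' = '}' ∧ top = false
        · rw [if_pos h2] at hcl; simp at hcl
        · rw [if_neg h2] at hcl ⊢
          simp only [] at hcl ⊢
          exact ih (i + 1) top (by omega) hcl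
    · simp only [rbcParse, if_neg hi]; omega

-- the central correspondence: the frame loop in terms of B's parser
lemma rbcM (t : List Char) : ∀ (fp fl i : Nat) (sb : List (List Char)) (buf : List Char),
    t.length ≤ fl + i → t.length + 1 ≤ fp + i →
    rbcB_loop t fl sb buf i =
      match sb with
      | [] => buf ++ (rbcParse t fp i true).1
      | parent :: rest =>
        if (rbcParse t fp i false).2.2 then
          rbcB_loop t t.length rest
            (parent ++ (if PySem.Chars.isIn ['|'] (buf ++ (rbcParse t fp i false).1) = true ∧
                PySem.Chars.startswith (buf ++ (rbcParse t fp i false).1) rbcBQ = true then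
              (PySem.Chars.splitOnMax (buf ++ (rbcParse t fp i false).1) ['|'] 1).getD 1 []
              else [])) (rbcParse t fp i false).2.1
        else sb.reverse.flatten ++ buf ++ (rbcParse t fp i false).1 := by
  intro fp
  induction fp with
  | zero =>
    intro fl i sb buf hl hg
    rw [rbc_loop_ge t fl sb buf i (by omega)]
    cases sb <;> simp [rbcParse]
  | succ fq ih =>
    intro fl i sb buf hl hg
    by_cases hi : i < t.length
    · obtain ⟨flp, rfl⟩ : ∃ g, fl = g + 1 := ⟨fl - 1, by omega⟩
      by_cases h1 : t.getD i ' ' = '{' ∧ i + 1 < t.length ∧ t.getD (i + 1) ' ' = '{'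
      · -- '{{' : LHS pushes a frame, RHS's parser makes the sub-parse call
        have L : rbcB_loop t (flp + 1) sb buf i = rbcB_loop t flp (buf :: sb) [] (i + 2) := by
          simp only [rbcB_loop, if_pos hi, if_pos h1]
        rw [L, ih flp (i + 2) (buf :: sb) [] (by omega) (by omega)]
        simp only []
        have hm : i + 2 ≤ (rbcParse t fq (i + 2) false).2.1 := rbc_parse_mono t fq (i + 2) false
        by_cases hc : (rbcParse t fq (i + 2) false).2.2 = true
        · -- the inner template closes
          rw [if_pos hc,
            ih t.length (rbcParse t fq (i + 2) false).2.1 sb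
              (buf ++ (if PySem.Chars.isIn ['|'] ([] ++ (rbcParse t fq (i + 2) false).1) = true ∧
                  PySem.Chars.startswith ([] ++ (rbcParse t fq (i + 2) false).1) rbcBQ = true then
                (PySem.Chars.splitOnMax ([] ++ (rbcParse t fq (i + 2) false).1) ['|'] 1).getD 1 []
                else [])) (by omega) (by omega)]
          have hpiece : (if PySem.Chars.isIn ['|'] ([] ++ (rbcParse t fq (i + 2) false).1) = true ∧
                  PySem.Chars.startswith ([] ++ (rbcParse t fq (i + 2) false).1) rbcBQ = true then
                (PySem.Chars.splitOnMax ([] ++ (rbcParse t fq (i + 2) false).1) ['|'] 1).getD 1 []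
                else []) = rbcPiece (rbcParse t fq (i + 2) false).2.2 (rbcParse t fq (i + 2) false).1 := by
            rw [hc, List.nil_append]
            exact rbc_piece_eq _
          rw [hpiece]
          cases sb with
          | nil =>
            simp only [rbcParse, if_pos hi, if_pos h1, List.append_assoc]
          | cons parent rest =>
            simp only [rbcParse, if_pos hi, if_pos h1, List.append_assoc]
        · -- the inner '{{' is never closed: the sub-parse runs to the end of the text
          rw [if_neg hc]
          have hend : t.length ≤ (rbcParse t fq (i + 2) false).2.1 :=
            rbc_parse_unclosed t fq (i + 2) false (by omega) (by simpa using hc)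
          have hs : rbcParse t fq (rbcParse t fq (i + 2) false).2.1 (sb.isEmpty) =
              ([], (rbcParse t fq (i + 2) false).2.1, false) := rbc_parse_ge t _ _ _ hend
          cases sb with
          | nil =>
            simp only [rbcParse, if_pos hi, if_pos h1]
            rw [rbc_parse_ge t fq _ true hend]
            simp [rbcPiece, Bool.not_eq_true] at hc ⊢
            simp [hc]
          | cons parent rest =>
            simp only [rbcParse, if_pos hi, if_pos h1]
            rw [rbc_parse_ge t fq _ false hend]
            simp only [Bool.not_eq_true] at hc
            simp [rbcPiece, hc, List.append_assoc]
      · by_cases h2 : t.getD i ' ' = '}' ∧ i + 1 < t.length ∧ t.getD (i + 1) ' ' = '}'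
        · -- '}}'
          cases sb with
          | nil =>
            -- top level: the parser treats '}' as a literal, the loop appends it
            have L : rbcB_loop t (flp + 1) [] buf i =
                rbcB_loop t flp [] (buf ++ [t.getD i ' ']) (i + 1) := by
              simp only [rbcB_loop, if_pos hi, if_neg h1, if_pos h2]
            rw [L, ih flp (i + 1) [] (buf ++ [t.getD i ' ']) (by omega) (by omega)]
            have hpc : ¬ (t.getD i ' ' = '}' ∧ i + 1 < t.length ∧ t.getD (i + 1) ' ' = '}' ∧
                (true : Bool) = false) := by simp
            simp only [rbcParse, if_pos hi, if_neg h1, if_neg hpc, List.append_assoc,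
              List.singleton_append]
          | cons parent rest =>
            -- a frame closes; parse returns ([], i+2, true)
            have R : rbcParse t (fq + 1) i false = ([], i + 2, true) := by
              simp only [rbcParse, if_pos hi, if_neg h1]
              rw [if_pos ⟨h2.1, h2.2.1, h2.2.2, trivial⟩]
            rw [R]
            simp only [List.append_nil]
            have L : rbcB_loop t (flp + 1) (parent :: rest) buf i =
                (if PySem.Chars.isIn ['|'] buf = true ∧
                    PySem.Chars.startswith buf rbcBQ = true then
                  rbcB_loop t flp rest
                    (parent ++ (PySem.Chars.splitOnMax buf ['|'] 1).getD 1 []) (i + 2)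
                else rbcB_loop t flp rest parent (i + 2)) := by
              simp only [rbcB_loop, if_pos hi, if_neg h1, if_pos h2]
            rw [L]
            by_cases h3 : PySem.Chars.isIn ['|'] buf = true ∧
                PySem.Chars.startswith buf rbcBQ = true
            · rw [if_pos h3, if_pos h3]
              exact rbc_loop_stab t flp t.length (i + 2) rest _ (by omega) (by omega)
            · rw [if_neg h3, if_neg h3]
              rw [rbc_loop_stab t flp t.length (i + 2) rest parent (by omega) (by omega)]
              simp
        · -- literal character
          have L : rbcB_loop t (flp + 1) sb buf i =
              rbcB_loop t flp sb (buf ++ [t.getD i ' ']) (i + 1) := by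
            cases sb <;> simp only [rbcB_loop, if_pos hi, if_neg h1, if_neg h2]
          rw [L, ih flp (i + 1) sb (buf ++ [t.getD i ' ']) (by omega) (by omega)]
          cases sb with
          | nil =>
            have hpc : ¬ (t.getD i ' ' = '}' ∧ i + 1 < t.length ∧ t.getD (i + 1) ' ' = '}' ∧
                (true : Bool) = false) := by simp
            simp only [rbcParse, if_pos hi, if_neg h1, if_neg hpc, List.append_assoc,
              List.singleton_append]
          | cons parent rest =>
            simp only [rbcParse, if_pos hi, if_neg h1]
            have hno : ¬ (t.getD i ' ' = '}' ∧ i + 1 < t.length ∧ t.getD (i + 1) ' ' = '}' ∧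
                True) := fun h => h2 ⟨h.1, h.2.1, h.2.2.1⟩
            rw [if_neg hno]
            simp only [List.append_assoc, List.singleton_append]
    · rw [rbc_loop_ge t _ sb buf i (by omega), rbc_parse_ge t _ i _ (by omega)]
      cases sb with
      | nil => rw [rbc_parse_ge t _ i _ (by omega)]; simp
      | cons parent rest => rw [rbc_parse_ge t _ i _ (by omega)]; simp

-- ===== VERDICT (by name: the statement is the Claim_ definition above) =====
theorem remove_braces_content_py_spec : Claim_equal_remove_braces_content_py := by
  unfold Claim_equal_remove_braces_content_py Spec_remove_braces_content_py
  intro text _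
  unfold remove_braces_content_py remove_braces_content_py_alt
  have h := rbc_key text.toList text.toList.length 0 [] []
  simp only [rbcAbs, List.reverse_nil, List.flatten_nil, List.nil_append] at h
  rw [h]
  have hm := rbcM text.toList (text.toList.length + 1) text.toList.length 0 [] []
    (by omega) (by omega)
  simp only [List.nil_append] at hm
  rw [hm]
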